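-- pv_equiv track=rewrite | github.com/dv4silj3v/python_Q1_C1 | task3.py | med
-- ===== SOURCE A (Python) =====
-- def med(arr):
--     for i in range(len(arr)):
--         left = 0
--         right = 0
--
--         for j in range(len(arr)):
--             if i == j or arr[j] == arr[i]:
--                 continue
--             elif arr[j] < arr[i]:
--                 left += 1
--             elif arr[j] > arr[i]:
--                 right += 1
--             else:
--                 raise Exception("Exiting..")
--
--         med_len = (len(arr) - 1) / 2
--
--         if left <= med_len and right <= med_len:
--             return i
-- ===== SOURCE B (Python) =====
-- def med(arr):
--     n = len(arr)
--     # one sorted pass builds, for every value v in arr: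
--     #   lower[v] = number of elements strictly below v
--     #   upper[v] = number of elements <= v
--     lower = {}
--     upper = {}
--     run = 0
--     for v in sorted(arr):
--         if v not in lower:
--             lower[v] = run
--         run += 1
--         upper[v] = run
--     for i, v in enumerate(arr):
--         if 2 * lower[v] <= n - 1 and 2 * (n - upper[v]) <= n - 1:
--             return i
--     return None
-- ===== Notes on version B (the rewrite author's own statement) =====
-- stated objective: faster
-- what changed: Replaced the quadratic per-index rescan (for every i, an inner loop counting smaller/larger elements) by one sort plus one pass over the sorted list that builds dictionaries mapping each value to its below-count and its at-or-below count, then a single scan of the original order with O(1) lookups.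
import Mathlib
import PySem

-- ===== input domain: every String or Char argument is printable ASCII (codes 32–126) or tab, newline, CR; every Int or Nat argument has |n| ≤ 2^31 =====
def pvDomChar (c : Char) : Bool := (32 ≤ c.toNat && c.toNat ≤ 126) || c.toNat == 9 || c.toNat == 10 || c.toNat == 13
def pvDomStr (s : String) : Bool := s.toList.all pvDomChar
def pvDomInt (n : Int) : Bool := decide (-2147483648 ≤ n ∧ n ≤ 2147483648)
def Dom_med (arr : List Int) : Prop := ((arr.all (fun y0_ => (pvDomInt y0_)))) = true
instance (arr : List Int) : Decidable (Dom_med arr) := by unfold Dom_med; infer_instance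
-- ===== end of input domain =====

-- B replaces A's quadratic per-index rescan by one sort plus one pass building below/at-or-below
-- count dictionaries, then a single scan of the original order (objective: faster).

-- ===== PORT A =====
-- inner loop 'for j in range(len(arr))' accumulating (left, right)
def medInner (arr : List Int) (i : Int) : Int × Int :=
  (PySem.List.pyRange 0 (arr.length : Int) 1).foldl
    (fun (lr : Int × Int) j =>
      if j = i ∨ PySem.List.pyGetD arr j 0 = PySem.List.pyGetD arr i 0 then lr
      else if PySem.List.pyGetD arr j 0 < PySem.List.pyGetD arr i 0 then (lr.1 + 1, lr.2)
      else if PySem.List.pyGetD arr j 0 > PySem.List.pyGetD arr i 0 then (lr.1, lr.2 + 1)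
      else lr)  -- Python's 'raise' branch: unreachable by Int trichotomy; state kept
    (0, 0)

-- outer loop with early return; Python compares int 'left' with float '(len(arr)-1)/2',
-- ported exactly as '2*left ≤ n-1' (exact here: n ≤ 2^31 keeps (n-1)/2 an exact dyadic float)
def medLoop (arr : List Int) : List Int → Option Int
  | [] => none
  | i :: rest =>
    let lr := medInner arr i
    if 2 * lr.1 ≤ (arr.length : Int) - 1 ∧ 2 * lr.2 ≤ (arr.length : Int) - 1 then some i
    else medLoop arr rest

def med (arr : List Int) : Option Int :=
  medLoop arr (PySem.List.pyRange 0 (arr.length : Int) 1)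

-- ===== PORT B =====
-- one pass over sorted(arr) building (lower, upper, run)
def medBuild (s : List Int) : PySem.Dict Int Int × PySem.Dict Int Int × Int :=
  s.foldl
    (fun st v =>
      let lower := if st.1.contains v then st.1 else st.1.insert v st.2.2
      (lower, st.2.1.insert v (st.2.2 + 1), st.2.2 + 1))
    (PySem.Dict.empty, PySem.Dict.empty, 0)

-- 'for i, v in enumerate(arr): if …: return i'; lower[v]/upper[v] are plain lookups whose key
-- is always present (v ∈ arr), so getD is exact here
def medScan (lower upper : PySem.Dict Int Int) (n : Int) : List (Int × Int) → Option Int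
  | [] => none
  | iv :: rest =>
    if 2 * lower.getD iv.2 0 ≤ n - 1 ∧ 2 * (n - upper.getD iv.2 0) ≤ n - 1 then some iv.1
    else medScan lower upper n rest

def med_alt (arr : List Int) : Option Int :=
  let st := medBuild (PySem.List.sorted arr (fun x => x) false)
  medScan st.1 st.2.1 (arr.length : Int) (PySem.List.enumerate arr 0)

-- ===== PRECONDITION & SPEC =====
def Spec_med (arr : List Int) (out : Option Int) : Prop := out = med_alt arr
instance (arr : List Int) (out : Option Int) : Decidable (Spec_med arr out) := by unfold Spec_med; infer_instance

-- ===== CLAIM (what is proved, stated in full; the proofs are below) =====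
def Claim_equal_med : Prop := ∀ (arr : List Int), Dom_med arr → Spec_med arr (med arr)

-- ===== LEMMAS AND PROOFS =====

-- skipping on x = v and counting x < v / v < x is one fold over the elements
theorem foldl_count (v : Int) (l : List Int) : ∀ (a b : Int),
    l.foldl (fun (lr : Int × Int) x =>
      if x = v then lr
      else if x < v then (lr.1 + 1, lr.2)
      else if v < x then (lr.1, lr.2 + 1) else lr) (a, b)
    = (a + (l.countP (fun x => decide (x < v)) : Int),
       b + (l.countP (fun x => decide (v < x)) : Int)) := by
  induction l with
  | nil => simp
  | cons x l ih =>
    intro a b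
    simp only [List.foldl_cons, List.countP_cons]
    by_cases h1 : x = v
    · subst h1; simp [ih]
    · by_cases h2 : x < v
      · simp only [if_neg h1, if_pos h2, ih]
        have h3 : ¬ v < x := by omega
        simp [h2, h3]
        omega
      · have h3 : v < x := by omega
        simp only [if_neg h1, if_neg h2, if_pos h3, ih]
        simp [h2, h3]
        omega

-- A's inner loop counts the elements strictly below / strictly above arr[i]
theorem medInner_eq (arr : List Int) (i : Int) :
    medInner arr i =
      ((arr.countP (fun x => decide (x < PySem.List.pyGetD arr i 0)) : Int),
       (arr.countP (fun x => decide (PySem.List.pyGetD arr i 0 < x)) : Int)) := by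
  unfold medInner
  set v := PySem.List.pyGetD arr i 0 with hv
  have hfun : (fun (lr : Int × Int) j =>
        if j = i ∨ PySem.List.pyGetD arr j 0 = v then lr
        else if PySem.List.pyGetD arr j 0 < v then (lr.1 + 1, lr.2)
        else if PySem.List.pyGetD arr j 0 > v then (lr.1, lr.2 + 1)
        else lr)
      = (fun (lr : Int × Int) j =>
        (fun (lr : Int × Int) (x : Int) =>
          if x = v then lr
          else if x < v then (lr.1 + 1, lr.2)
          else if v < x then (lr.1, lr.2 + 1) else lr) lr (PySem.List.pyGetD arr j 0)) := by
    funext lr j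
    by_cases hj : j = i
    · subst hj; simp [hv]
    · simp only [hj, false_or, gt_iff_lt]
  rw [hfun]
  rw [PySem.List.foldl_pyRange_zero_pyGetD' arr 0
      (fun (lr : Int × Int) (x : Int) =>
          if x = v then lr
          else if x < v then (lr.1 + 1, lr.2)
          else if v < x then (lr.1, lr.2 + 1) else lr) (0, 0)]
  rw [foldl_count]
  simp

-- B's build pass over a sorted list: run = length, lower keys = members, and the
-- below / at-or-below counts are as claimed
theorem medBuild_spec (s : List Int) (hs : s.Pairwise (· ≤ ·)) :
    (medBuild s).2.2 = (s.length : Int) ∧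
    (∀ v : Int, (medBuild s).1.contains v = decide (v ∈ s)) ∧
    (∀ v ∈ s,
      (medBuild s).1.getD v 0 = (s.countP (fun x => decide (x < v)) : Int) ∧
      (medBuild s).2.1.getD v 0 = (s.countP (fun x => decide (x ≤ v)) : Int)) := by
  induction s using List.reverseRecOn with
  | nil => refine ⟨rfl, ?_, ?_⟩ <;> simp [medBuild]
  | append_singleton t w ih =>
    rw [List.pairwise_append] at hs
    obtain ⟨hst, -, hle⟩ := hs
    have hlew : ∀ x ∈ t, x ≤ w := fun x hx => hle x hx w (by simp)
    obtain ⟨hrun, hcont, hget⟩ := ih hst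
    have hstep : medBuild (t ++ [w]) =
        ((if (medBuild t).1.contains w then (medBuild t).1
          else (medBuild t).1.insert w (medBuild t).2.2),
         (medBuild t).2.1.insert w ((medBuild t).2.2 + 1), (medBuild t).2.2 + 1) := by
      unfold medBuild
      rw [List.foldl_append]
      simp only [List.foldl_cons, List.foldl_nil]
    refine ⟨?_, ?_, ?_⟩
    · rw [hstep]; simp [hrun]
    · intro v
      rw [hstep]
      by_cases hcw : (medBuild t).1.contains w
      · have hwmem : w ∈ t := of_decide_eq_true ((hcont w).symm.trans hcw ▸ rfl)
        simp only [if_pos hcw, hcont v, List.mem_append, List.mem_singleton]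
        by_cases hv : v = w
        · subst hv; simp [hwmem]
        · simp [hv]
      · simp only [if_neg hcw, PySem.Dict.contains_insert, hcont v, List.mem_append,
          List.mem_singleton]
        by_cases hv : v = w
        · subst hv; simp
        · simp [hv]
    · intro v hv
      have hcountlt : (t ++ [w]).countP (fun x => decide (x < v)) =
          t.countP (fun x => decide (x < v)) + (if w < v then 1 else 0) := by
        simp [List.countP_append, List.countP_cons]
      have hcountle : (t ++ [w]).countP (fun x => decide (x ≤ v)) =
          t.countP (fun x => decide (x ≤ v)) + (if w ≤ v then 1 else 0) := by
        simp [List.countP_append, List.countP_cons]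
      rw [hstep]
      by_cases hvw : v = w
      · subst hvw
        constructor
        · by_cases hcw : (medBuild t).1.contains v
          · have hwmem : v ∈ t := of_decide_eq_true ((hcont v).symm.trans hcw ▸ rfl)
            have := (hget v hwmem).1
            simp only [if_pos hcw, this, hcountlt]
            simp
          · have hwnmem : v ∉ t := by
              intro h
              rw [hcont v, decide_eq_true_eq] at hcw; exact hcw h
            have hall : t.countP (fun x => decide (x < v)) = t.length :=
              List.countP_eq_length.mpr (fun x hx => by
                have h1 := hlew x hx
                have h2 : x ≠ v := fun h => hwnmem (h ▸ hx)
                simp; omega)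
            simp only [if_neg hcw, PySem.Dict.getD_insert_self, hcountlt, hall, hrun]
            simp
        · have hall : t.countP (fun x => decide (x ≤ v)) = t.length :=
            List.countP_eq_length.mpr (fun x hx => by simp [hlew x hx])
          simp only [PySem.Dict.getD_insert_self, hcountle, hall, hrun]
          simp
      · have hvt : v ∈ t := by
          rcases List.mem_append.mp hv with h | h
          · exact h
          · exact absurd (List.mem_singleton.mp h) hvw
        have hvlew : v ≤ w := hlew v hvt
        have hnlt : ¬ w < v := by omega
        have hnle : ¬ w ≤ v := by omega
        obtain ⟨hlo, hup⟩ := hget v hvt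
        constructor
        · by_cases hcw : (medBuild t).1.contains w
          · simp only [if_pos hcw, hlo, hcountlt, if_neg hnlt]
            simp
          · simp only [if_neg hcw, PySem.Dict.getD_insert_of_ne _ _ _ hvw, hlo, hcountlt,
              if_neg hnlt]
            simp
        · simp only [PySem.Dict.getD_insert_of_ne _ _ _ hvw, hup, hcountle, if_neg hnle]
          simp

-- at every index, A's acceptance test and B's dictionary test agree
theorem cond_iff (arr : List Int) (j : Nat) (hj : j < arr.length) :
    ((2 * ((arr.countP (fun x => decide (x < arr[j])) : Int)) ≤ (arr.length : Int) - 1 ∧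
      2 * ((arr.countP (fun x => decide (arr[j] < x)) : Int)) ≤ (arr.length : Int) - 1) ↔
     (2 * (medBuild (PySem.List.sorted arr (fun x => x) false)).1.getD arr[j] 0 ≤ (arr.length : Int) - 1 ∧
      2 * ((arr.length : Int) - (medBuild (PySem.List.sorted arr (fun x => x) false)).2.1.getD arr[j] 0) ≤ (arr.length : Int) - 1)) := by
  have hs := PySem.List.sorted_pairwise arr (fun x => x)
  obtain ⟨-, -, hget⟩ := medBuild_spec _ hs
  have hperm := PySem.List.sorted_perm arr (fun x => x) false
  have hmem : arr[j] ∈ PySem.List.sorted arr (fun x => x) false := by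
    rw [PySem.List.mem_sorted]; exact List.getElem_mem hj
  obtain ⟨hlo, hup⟩ := hget arr[j] hmem
  rw [hperm.countP_eq] at hlo hup
  have hkey : arr.length = arr.countP (fun x => decide (x ≤ arr[j])) +
      arr.countP (fun x => decide (arr[j] < x)) := by
    have h1 := List.length_eq_countP_add_countP (fun x => decide (x ≤ arr[j])) (l := arr)
    have h2 : arr.countP (fun a => decide ¬(decide (a ≤ arr[j]) = true)) =
        arr.countP (fun x => decide (arr[j] < x)) :=
      List.countP_congr (fun x _ => by simp)
    omega
  rw [hlo, hup]
  omega

-- the two scans return the same first index, given pointwise-equivalent tests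
theorem scan_eq (arr : List Int) (lo up : PySem.Dict Int Int)
    (h : ∀ (j : Nat) (hj : j < arr.length),
      ((2 * ((arr.countP (fun x => decide (x < arr[j])) : Int)) ≤ (arr.length : Int) - 1 ∧
        2 * ((arr.countP (fun x => decide (arr[j] < x)) : Int)) ≤ (arr.length : Int) - 1) ↔
       (2 * lo.getD arr[j] 0 ≤ (arr.length : Int) - 1 ∧
        2 * ((arr.length : Int) - up.getD arr[j] 0) ≤ (arr.length : Int) - 1))) :
    ∀ (k a : Nat), a + k = arr.length →
      medLoop arr (PySem.List.pyRange (a : Int) (arr.length : Int) 1) =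
        medScan lo up (arr.length : Int) (PySem.List.enumerate (arr.drop a) (a : Int)) := by
  intro k
  induction k with
  | zero =>
    intro a ha
    have : arr.drop a = [] := by
      rw [show a = arr.length by omega]; exact List.drop_length
    rw [this, PySem.List.pyRange_one_eq_nil (by exact_mod_cast Nat.cast_le.mpr (by omega))]
    simp [medLoop, medScan, PySem.List.enumerate]
  | succ k ih =>
    intro a ha
    have hlt : a < arr.length := by omega
    rw [PySem.List.pyRange_one_cons (show ((a:Int)) < (arr.length:Int) by exact_mod_cast hlt),
        List.drop_eq_getElem_cons hlt, PySem.List.enumerate_cons]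
    simp only [medLoop, medScan]
    have hInner := medInner_eq arr (a : Int)
    have hval : PySem.List.pyGetD arr (a : Int) 0 = arr[a] := by
      rw [PySem.List.pyGetD_natCast]
      exact List.getD_eq_getElem arr 0 hlt
    rw [hval] at hInner
    rw [hInner]
    by_cases hc : 2 * ((arr.countP (fun x => decide (x < arr[a])) : Int)) ≤ (arr.length : Int) - 1 ∧
        2 * ((arr.countP (fun x => decide (arr[a] < x)) : Int)) ≤ (arr.length : Int) - 1
    · rw [if_pos hc, if_pos (by simpa using (h a hlt).mp hc)]
    · rw [if_neg hc, if_neg (by simpa using fun hb => hc ((h a hlt).mpr hb))]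
      have := ih (a + 1) (by omega)
      push_cast at this ⊢
      exact this

theorem med_eq_alt (arr : List Int) : med arr = med_alt arr := by
  have h := scan_eq arr (medBuild (PySem.List.sorted arr (fun x => x) false)).1
    (medBuild (PySem.List.sorted arr (fun x => x) false)).2.1
    (fun j hj => cond_iff arr j hj) arr.length 0 (by omega)
  simpa [med, med_alt] using h

-- ===== VERDICT (by name: the statement is the Claim_ definition above) =====
theorem med_spec : Claim_equal_med := by
  intro arr _
  unfold Spec_med
  exact med_eq_alt arr
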